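-- pv_equiv track=rewrite | github.com/MolfarUA/CodeWars_Solutions | 2 kyu/Fastest Code : Equal to 24/solution.py | remove_redundant_brackets
-- ===== SOURCE A (Python) =====
-- def remove_redundant_brackets(expr):
--     stack = []
--     # indices to be deleted
--     indices = []
--     for i, ch in enumerate(expr):
--         if ch == '(':
--             stack.append(i)
--         if ch == ')':
--             last_bracket_index = stack.pop()
--             enclosed = expr[last_bracket_index + 1:i]
--             if enclosed.isdigit():
--                 indices.append(i)
--                 indices.append(last_bracket_index)
--     return "".join([char for idx, char in enumerate(expr) if idx not in indices])
-- ===== SOURCE B (Python) =====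
-- def remove_redundant_brackets(expr):
--     # Alternative single-pass formulation: each stack frame tracks
--     # (open index, saw-a-digit, no-non-digit-seen); deletions are collected in a set,
--     # so there is no substring slicing / isdigit rescan at each ')'.
--     stack = []
--     dels = set()
--     for i, ch in enumerate(expr):
--         if ch == '(':
--             if stack:
--                 stack[-1][2] = False
--             stack.append([i, False, True])
--         elif ch == ')':
--             l, has_digit, clean = stack.pop()
--             if stack:
--                 stack[-1][2] = False
--             if has_digit and clean:
--                 dels.add(l)
--                 dels.add(i)
--         elif ch.isdigit():
--             if stack:
--                 stack[-1][1] = True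
--         else:
--             if stack:
--                 stack[-1][2] = False
--     return "".join(ch for i, ch in enumerate(expr) if i not in dels)
-- ===== Notes on version B (the rewrite author's own statement) =====
-- stated objective: alternative
-- what changed: Instead of slicing expr[l+1:i] and rescanning it with isdigit() at every ')' (and scanning the deletion list per character in the final join), B maintains per-stack-frame flags (saw-a-digit, no-non-digit-seen) updated once per character and collects deletions in a set, a single-pass algorithm; measured running time is comparable to A's on generated inputs.
import Mathlib
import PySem

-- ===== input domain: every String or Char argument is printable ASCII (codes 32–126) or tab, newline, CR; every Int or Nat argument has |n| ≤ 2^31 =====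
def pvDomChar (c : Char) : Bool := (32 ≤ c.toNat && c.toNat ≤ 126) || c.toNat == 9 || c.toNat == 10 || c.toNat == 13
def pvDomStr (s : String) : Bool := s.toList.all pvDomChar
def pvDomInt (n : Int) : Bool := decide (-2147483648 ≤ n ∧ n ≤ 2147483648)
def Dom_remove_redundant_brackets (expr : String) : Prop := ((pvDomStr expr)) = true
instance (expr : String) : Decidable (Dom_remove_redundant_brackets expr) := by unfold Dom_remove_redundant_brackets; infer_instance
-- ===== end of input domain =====

-- B (alternative algorithm): instead of A's per-')' substring slice + isdigit rescan and the
-- per-character scan of the deletion list in the final join, B keeps per-stack-frame digit flags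
-- updated once per character and a deletion set. Equivalence of return values is proved on Pre_:
-- inputs on which no prefix has more ')' than '(' (elsewhere Python A raises IndexError on
-- stack.pop(), and so does B).

-- ===== PORT A =====
-- A's loop over enumerate(expr); Python's list used as a stack (append/pop at the end)
-- is represented with the head of the Lean list as the stack top. 'none' = IndexError
-- from stack.pop() on an unmatched ')'.
def loopA (full : List Char) : List (Int × Char) → List Int × List Int → Option (List Int × List Int)
  | [], st => some st
  | (i, ch) :: rest, (stack, inds) =>
    let stack := if ch = '(' then i :: stack else stack
    if ch = ')' then
      match stack with
      | [] => none
      | l :: stack' =>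
        let enclosed := PySem.List.slice full (some (l + 1)) (some i)
        let inds := if PySem.Chars.strIsdigit enclosed then inds ++ [i, l] else inds
        loopA full rest (stack', inds)
    else loopA full rest (stack, inds)

def remove_redundant_brackets (expr : String) : String :=
  let cs := expr.toList
  match loopA cs (PySem.List.enumerate cs 0) ([], []) with
  | none => ""  -- unreachable under Pre_ (Python raises IndexError here)
  | some (_, indices) =>
      String.ofList (((PySem.List.enumerate cs 0).filter (fun p => !(indices.contains p.1))).map (·.2))

-- ===== PORT B =====
-- B's stack frames are (open index, has_digit, clean); the in-place mutations
-- stack[-1][1] = True / stack[-1][2] = False become head-rewrites.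
def markDigit : List (Int × Bool × Bool) → List (Int × Bool × Bool)
  | [] => []
  | (l, _, c) :: t => (l, true, c) :: t

def markUnclean : List (Int × Bool × Bool) → List (Int × Bool × Bool)
  | [] => []
  | (l, h, _) :: t => (l, h, false) :: t

def loopB : List (Int × Char) → List (Int × Bool × Bool) × PySem.Set Int → Option (List (Int × Bool × Bool) × PySem.Set Int)
  | [], st => some st
  | (i, ch) :: rest, (stack, dels) =>
    if ch = '(' then
      loopB rest ((i, false, true) :: markUnclean stack, dels)
    else if ch = ')' then
      match stack with
      | [] => none
      | (l, has, clean) :: stack' =>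
        let dels := if has && clean then PySem.Set.add (PySem.Set.add dels l) i else dels
        loopB rest (markUnclean stack', dels)
    else if PySem.Chars.isdigit ch then
      loopB rest (markDigit stack, dels)
    else
      loopB rest (markUnclean stack, dels)

def remove_redundant_brackets_alt (expr : String) : String :=
  let cs := expr.toList
  match loopB (PySem.List.enumerate cs 0) ([], PySem.Set.empty) with
  | none => ""  -- unreachable under Pre_ (Python raises IndexError here)
  | some (_, dels) =>
      String.ofList (((PySem.List.enumerate cs 0).filter (fun p => !(PySem.Set.contains dels p.1))).map (·.2))

-- ===== PRECONDITION & SPEC =====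
-- Pre_ excludes exactly the inputs with a prefix containing more ')' than '(',
-- on which Python A (and Python B) raise IndexError from stack.pop().
def Pre_remove_redundant_brackets (expr : String) : Prop :=
  ∀ n, n ≤ expr.toList.length →
    (expr.toList.take n).count ')' ≤ (expr.toList.take n).count '('
instance (expr : String) : Decidable (Pre_remove_redundant_brackets expr) := by
  unfold Pre_remove_redundant_brackets; infer_instance

def pvWitness_remove_redundant_brackets : String := "(2+(35))*(a)"

def Spec_remove_redundant_brackets (expr : String) (out : String) : Prop := out = remove_redundant_brackets_alt expr
instance (expr : String) (out : String) : Decidable (Spec_remove_redundant_brackets expr out) := by unfold Spec_remove_redundant_brackets; infer_instance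

-- ===== CLAIM (what is proved, stated in full; the proofs are below) =====
def Claim_equal_remove_redundant_brackets : Prop := ∀ (expr : String), Dom_remove_redundant_brackets expr → Pre_remove_redundant_brackets expr → Spec_remove_redundant_brackets expr (remove_redundant_brackets expr)

-- ===== LEMMAS AND PROOFS =====
theorem take_snoc (full : List Char) (i : Nat) (c : Char) (suf : List Char) (h : full.drop i = c :: suf) :
    full.take (i+1) = full.take i ++ [c] := by
  have hg : full[i]? = some c := by
    have := (List.getElem?_drop (xs := full) (i := i) (j := 0)).symm
    simpa [h] using this
  simp [List.take_add_one, hg]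

def between (full : List Char) (l : Int) (i : Nat) : List Char :=
  (full.take i).drop (l.toNat + 1)

theorem between_snoc (full : List Char) (n i : Nat) (c : Char) (suf : List Char)
    (hn : n + 1 ≤ i) (hi : i ≤ full.length) (h : full.drop i = c :: suf) :
    between full (n : Int) (i+1) = between full (n : Int) i ++ [c] := by
  unfold between
  rw [take_snoc full i c suf h, List.drop_append_of_le_length (by simp; omega)]

theorem between_self_nil (full : List Char) (i : Nat) :
    between full (i : Int) (i+1) = [] := by
  unfold between
  exact List.drop_eq_nil_of_le (by simp)

theorem between_eq_slice (full : List Char) (n i : Nat) :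
    PySem.List.slice full (some ((n : Int) + 1)) (some (i : Int)) = between full (n : Int) i := by
  have h : ((n : Int) + 1) = ((n+1 : Nat) : Int) := by push_cast; ring
  rw [h, PySem.List.slice_natCast]
  unfold between
  simp [List.drop_take]

def FrameIdx (i : Nat) (f : Int × Bool × Bool) : Prop :=
  ∃ n : Nat, f.1 = (n : Int) ∧ n + 1 ≤ i

def DeadFrame (full : List Char) (i : Nat) (f : Int × Bool × Bool) : Prop :=
  FrameIdx i f ∧ f.2.2 = false ∧ (between full f.1 i).all PySem.Chars.isdigit = false

def TopInv (full : List Char) (i : Nat) (t : Int × Bool × Bool) : Prop :=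
  FrameIdx i t ∧ t.2.2 = (between full t.1 i).all PySem.Chars.isdigit ∧
    (t.2.2 = true → t.2.1 = !(between full t.1 i).isEmpty)

def StackInv (full : List Char) (i : Nat) : List (Int × Bool × Bool) → Prop
  | [] => True
  | t :: r => TopInv full i t ∧ ∀ f ∈ r, DeadFrame full i f

theorem DeadFrame_step (full : List Char) (i : Nat) (c : Char) (suf : List Char)
    (h : full.drop i = c :: suf) (hi : i ≤ full.length) (f : Int × Bool × Bool)
    (hf : DeadFrame full i f) : DeadFrame full (i+1) f := by
  obtain ⟨⟨n, hn1, hn2⟩, hcl, hall⟩ := hf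
  refine ⟨⟨n, hn1, by omega⟩, hcl, ?_⟩
  rw [hn1] at hall ⊢
  rw [between_snoc full n i c suf hn2 hi h]
  simp [hall]

theorem TopInv_unclean_dead (full : List Char) (i : Nat) (f : Int × Bool × Bool)
    (hf : DeadFrame full i f) : TopInv full i (f.1, f.2.1, false) := by
  obtain ⟨hidx, hcl, hall⟩ := hf
  exact ⟨hidx, by simp [hall], by simp⟩

theorem map_fst_markUnclean (s : List (Int × Bool × Bool)) :
    (markUnclean s).map (·.1) = s.map (·.1) := by
  cases s with
  | nil => rfl
  | cons t r => rcases t with ⟨l, h, c⟩; rfl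

theorem map_fst_markDigit (s : List (Int × Bool × Bool)) :
    (markDigit s).map (·.1) = s.map (·.1) := by
  cases s with
  | nil => rfl
  | cons t r => rcases t with ⟨l, h, c⟩; rfl

theorem cond_eq (full : List Char) (i : Nat) (t : Int × Bool × Bool)
    (htop : TopInv full i t) :
    PySem.Chars.strIsdigit (PySem.List.slice full (some (t.1 + 1)) (some (i : Int))) = (t.2.1 && t.2.2) := by
  obtain ⟨⟨n, hn1, hn2⟩, hcl, hhas⟩ := htop
  rw [hn1, between_eq_slice full n i]
  rw [hn1] at hcl hhas
  cases ht : t.2.2 with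
  | false =>
    rw [ht] at hcl
    simp [PySem.Chars.strIsdigit, ← hcl]
  | true =>
    rw [ht] at hcl hhas
    have := hhas rfl
    simp [PySem.Chars.strIsdigit, ← hcl, this, Bool.and_comm]

theorem loopA_loopB_sim (full : List Char) (suf : List Char) :
    ∀ (i : Nat), full.drop i = suf → i ≤ full.length →
    ∀ (sB : List (Int × Bool × Bool)) (inds : List Int) (dels : PySem.Set Int),
      StackInv full i sB →
      (∀ x, x ∈ inds ↔ x ∈ dels) →
      (match loopA full (PySem.List.enumerate suf (i : Int)) (sB.map (·.1), inds),
             loopB (PySem.List.enumerate suf (i : Int)) (sB, dels) with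
       | none, none => True
       | some (_, inds'), some (_, dels') => ∀ x, x ∈ inds' ↔ x ∈ dels'
       | _, _ => False) := by
  induction suf with
  | nil =>
    intro i _ _ sB inds dels _ hmem
    simp [PySem.List.enumerate, loopA, loopB, hmem]
  | cons c suf ih =>
    intro i hdrop hi sB inds dels hst hmem
    have hi' : i < full.length := by
      by_contra hc
      rw [List.drop_eq_nil_of_le (by omega)] at hdrop
      exact (List.cons_ne_nil c suf) hdrop.symm
    have hdrop' : full.drop (i+1) = suf := by
      have := congrArg List.tail hdrop
      simpa [List.tail_drop] using this
    rw [PySem.List.enumerate_cons]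
    have hcast : (i : Int) + 1 = ((i+1 : Nat) : Int) := by push_cast; ring
    rw [hcast]
    by_cases hc1 : c = '('
    · -- push branch
      subst hc1
      have hst' : StackInv full (i+1) (((i : Int), false, true) :: markUnclean sB) := by
        constructor
        · refine ⟨⟨i, rfl, le_refl _⟩, ?_, ?_⟩
          · simp [between_self_nil]
          · simp [between_self_nil]
        · intro f hf
          cases sB with
          | nil => simp [markUnclean] at hf
          | cons t r =>
            obtain ⟨⟨⟨n, hn1, hn2⟩, hcl, _⟩, hrest⟩ := hst
            rcases t with ⟨l, h2, h3⟩
            simp only [markUnclean, List.mem_cons] at hf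
            rcases hf with hf | hf
            · subst hf
              refine ⟨⟨n, hn1, by omega⟩, rfl, ?_⟩
              simp only at hn1
              rw [hn1]
              rw [between_snoc full n i '(' suf hn2 (by omega) hdrop]
              simp [PySem.Chars.isdigit]
            · exact DeadFrame_step full i '(' suf hdrop (by omega) f (hrest f hf)
      have := ih (i+1) hdrop' (by omega) (((i : Int), false, true) :: markUnclean sB) inds dels hst' hmem
      simpa [loopA, loopB, map_fst_markUnclean] using this
    · by_cases hc2 : c = ')'
      · -- pop branch
        subst hc2
        cases sB with
        | nil =>
          simp [loopA, loopB, hc1]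
        | cons t r =>
          obtain ⟨htop, hrest⟩ := hst
          rcases t with ⟨l, has, clean⟩
          have hcond := cond_eq full i (l, has, clean) htop
          have hst' : StackInv full (i+1) (markUnclean r) := by
            cases r with
            | nil => trivial
            | cons f r' =>
              rcases f with ⟨l', h', c'⟩
              have hd : DeadFrame full (i+1) (l', h', c') :=
                DeadFrame_step full i ')' suf hdrop (by omega) _ (hrest _ (by simp))
              constructor
              · exact TopInv_unclean_dead full (i+1) (l', h', c') hd
              · intro f hf
                exact DeadFrame_step full i ')' suf hdrop (by omega) f (hrest f (by simp [hf]))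
          have hmem' : ∀ x, x ∈ (if PySem.Chars.strIsdigit (PySem.List.slice full (some (l + 1)) (some (i : Int))) then inds ++ [(i : Int), l] else inds) ↔
              x ∈ (if has && clean then PySem.Set.add (PySem.Set.add dels l) (i : Int) else dels) := by
            rw [hcond]
            cases has <;> cases clean <;> intro x <;>
              simp [PySem.Set.mem_add, hmem] <;> tauto
          have := ih (i+1) hdrop' (by omega) (markUnclean r) _ _ hst' hmem'
          simpa [loopA, loopB, hc1, map_fst_markUnclean] using this
      · -- digit / other branch
        have hAside := ih (i+1) hdrop' (by omega)
        by_cases hd : PySem.Chars.isdigit c = true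
        · have hst' : StackInv full (i+1) (markDigit sB) := by
            cases sB with
            | nil => trivial
            | cons t r =>
              obtain ⟨⟨⟨n, hn1, hn2⟩, hcl, hhas⟩, hrest⟩ := hst
              rcases t with ⟨l, h2, h3⟩
              have hl : l = (n : Int) := hn1
              have hcl' : h3 = (between full l i).all PySem.Chars.isdigit := hcl
              constructor
              · refine ⟨⟨n, hn1, by omega⟩, ?_, ?_⟩
                · show h3 = (between full l (i+1)).all PySem.Chars.isdigit
                  rw [hl, between_snoc full n i c suf hn2 (by omega) hdrop]
                  rw [hl] at hcl'
                  simpa [hd] using hcl'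
                · intro _
                  show true = !(between full l (i+1)).isEmpty
                  rw [hl, between_snoc full n i c suf hn2 (by omega) hdrop]
                  simp
              · intro f hf
                exact DeadFrame_step full i c suf hdrop (by omega) f (hrest f hf)
          have := hAside (markDigit sB) inds dels hst' hmem
          simpa [loopA, loopB, hc1, hc2, hd, map_fst_markDigit] using this
        · have hst' : StackInv full (i+1) (markUnclean sB) := by
            cases sB with
            | nil => trivial
            | cons t r =>
              obtain ⟨⟨⟨n, hn1, hn2⟩, hcl, hhas⟩, hrest⟩ := hst
              rcases t with ⟨l, h2, h3⟩
              have hl : l = (n : Int) := hn1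
              constructor
              · refine ⟨⟨n, hn1, by omega⟩, ?_, ?_⟩
                · show false = (between full l (i+1)).all PySem.Chars.isdigit
                  rw [hl, between_snoc full n i c suf hn2 (by omega) hdrop]
                  simp [Bool.not_eq_true] at hd
                  simp [hd]
                · intro h
                  exact absurd h (by simp)
              · intro f hf
                exact DeadFrame_step full i c suf hdrop (by omega) f (hrest f hf)
          have := hAside (markUnclean sB) inds dels hst' hmem
          simpa [loopA, loopB, hc1, hc2, hd, map_fst_markUnclean] using this

theorem A_eq_alt (expr : String) : remove_redundant_brackets expr = remove_redundant_brackets_alt expr := by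
  have h := loopA_loopB_sim expr.toList expr.toList 0 (by simp) (by simp) [] [] PySem.Set.empty trivial (by simp [PySem.Set.empty])
  simp only [Nat.cast_zero, List.map_nil] at h
  unfold remove_redundant_brackets remove_redundant_brackets_alt
  rcases hA : loopA expr.toList (PySem.List.enumerate expr.toList 0) ([], []) with _ | ⟨sA', inds'⟩ <;>
    rcases hB : loopB (PySem.List.enumerate expr.toList 0) ([], PySem.Set.empty) with _ | ⟨sB', dels'⟩ <;>
    rw [hA, hB] at h <;> simp only [hA, hB]
  · exact (h : False).elim
  · exact (h : False).elim
  · have h' : ∀ x : Int, x ∈ inds' ↔ x ∈ dels' := h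
    apply congrArg
    apply congrArg
    apply List.filter_congr
    intro p _
    simp [PySem.Set.contains_eq_listContains, h']

-- ===== VERDICT (by name: the statement is the Claim_ definition above) =====
theorem remove_redundant_brackets_spec : Claim_equal_remove_redundant_brackets := by
  intro expr _ _
  exact A_eq_alt expr
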